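-- pv_equiv track=rewrite | github.com/algorithm-studyy/algorithm | jiwon/programmers/python/that_song.py | concat_music
-- ===== SOURCE A (Python) =====
-- def concat_music(melody, limit):
--     result = []
--     while len(result) < limit:
--         for m in melody:
--             if len(result) >= limit:
--                 return ''.join(result)
--             result.append(m)
--
--     return ''.join(result)
-- ===== SOURCE B (Python) =====
-- def concat_music(melody, limit):
--     if limit <= 0 or not melody:
--         return ''
--     k = limit // len(melody) + 1
--     return ''.join((melody * k)[:limit])
-- ===== Notes on version B (the rewrite author's own statement) =====
-- stated objective: simpler
-- what changed: Replaces the incremental while/for append loop with early exit by an arithmetic repeat-then-truncate: compute k = limit//len(melody)+1, build melody*k once and slice its first limit elements; Pre_ excludes empty melody with positive limit, where A loops forever.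
import Mathlib
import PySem

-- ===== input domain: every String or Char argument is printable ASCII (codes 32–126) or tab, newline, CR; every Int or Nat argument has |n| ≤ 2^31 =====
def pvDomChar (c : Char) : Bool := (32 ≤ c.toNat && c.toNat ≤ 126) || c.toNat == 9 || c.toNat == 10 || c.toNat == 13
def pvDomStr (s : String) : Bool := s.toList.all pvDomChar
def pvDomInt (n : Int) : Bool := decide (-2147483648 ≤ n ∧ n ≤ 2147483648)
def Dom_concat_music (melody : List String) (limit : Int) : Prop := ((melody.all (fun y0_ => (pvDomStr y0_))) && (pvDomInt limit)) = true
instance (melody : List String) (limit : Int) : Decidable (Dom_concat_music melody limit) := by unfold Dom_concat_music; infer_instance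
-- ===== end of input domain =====

-- B replaces A's incremental while/for append loop (early exit) by repeat-then-truncate:
-- k = limit//len(melody)+1 whole copies, sliced to the first `limit` elements (objective: simpler).
-- Pre_ excludes empty melody with positive limit, on which A loops forever.


-- ===== PORT A =====
-- the inner `for m in melody` loop; Sum.inl = early `return`, Sum.inr = loop ran off the end
def innerFor (melody : List String) (limit : Int) (result : List String) :
    List String ⊕ List String :=
  match melody with
  | [] => Sum.inr result
  | m :: ms =>
      if limit ≤ (result.length : Int) then Sum.inl result
      else innerFor ms limit (result ++ [m])

-- needed by whileLoop's termination proof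
lemma innerFor_inr_length (melody : List String) (limit : Int) :
    ∀ result res, innerFor melody limit result = Sum.inr res →
      res.length = result.length + melody.length := by
  induction melody with
  | nil =>
      intro result res h
      simp only [innerFor, Sum.inr.injEq] at h
      simp [h]
  | cons m ms ih =>
      intro result res h
      simp only [innerFor] at h
      split at h
      · exact absurd h (by simp)
      · have := ih (result ++ [m]) res h
        simp at this ⊢
        omega

-- the outer `while len(result) < limit` loop
def whileLoop (melody : List String) (limit : Int) (result : List String) : List String :=
  if h : (result.length : Int) < limit then
    match h2 : innerFor melody limit result with
    | Sum.inl res => res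
    | Sum.inr res =>
        if hm : melody = [] then res
        else whileLoop melody limit res
  else result
termination_by (limit - (result.length : Int)).toNat
decreasing_by
  have hlen := innerFor_inr_length melody limit result res h2
  have hm' : melody.length ≠ 0 := by simpa [List.length_eq_zero_iff] using hm
  omega

def concat_music (melody : List String) (limit : Int) : String :=
  PySem.Str.join "" (whileLoop melody limit [])

-- ===== PORT B =====
def concat_music_alt (melody : List String) (limit : Int) : String :=
  if limit ≤ 0 ∨ melody = [] then ""
  else
    let k := PySem.Int.floordiv limit (melody.length : Int) + 1
    PySem.Str.join "" (PySem.List.slice (PySem.List.pyRepeat melody k) none (some limit))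

-- ===== PRECONDITION & SPEC =====
-- Pre_ excludes empty melody with positive limit: there A's while loop never terminates.
def Pre_concat_music (melody : List String) (limit : Int) : Prop :=
  melody ≠ [] ∨ limit ≤ 0
instance (melody : List String) (limit : Int) : Decidable (Pre_concat_music melody limit) := by
  unfold Pre_concat_music; infer_instance

def pvWitness_concat_music : List String × Int := (["a"], 2)

def Spec_concat_music (melody : List String) (limit : Int) (out : String) : Prop := out = concat_music_alt melody limit
instance (melody : List String) (limit : Int) (out : String) : Decidable (Spec_concat_music melody limit out) := by unfold Spec_concat_music; infer_instance

-- ===== CLAIM (what is proved, stated in full; the proofs are below) =====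
def Claim_equal_concat_music : Prop := ∀ (melody : List String) (limit : Int), Dom_concat_music melody limit → Pre_concat_music melody limit → Spec_concat_music melody limit (concat_music melody limit)

-- ===== LEMMAS AND PROOFS =====

-- reference: the first n elements of melody repeated forever
def cyc (melody : List String) (n : Nat) : List String :=
  if h : melody = [] ∨ n = 0 then []
  else if melody.length ≤ n then melody ++ cyc melody (n - melody.length)
  else melody.take n
termination_by n
decreasing_by
  push_neg at h
  have : melody.length ≠ 0 := by simpa [List.length_eq_zero_iff] using h.1
  omega

lemma innerFor_spec (melody : List String) (limit : Int) :
    ∀ result, innerFor melody limit result =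
      (if (result.length : Int) + melody.length ≤ limit ∨ melody = []
       then Sum.inr else Sum.inl)
        (result ++ melody.take (limit - (result.length : Int)).toNat) := by
  induction melody with
  | nil => intro result; simp [innerFor]
  | cons m ms ih =>
      intro result
      simp only [innerFor]
      by_cases hle : limit ≤ (result.length : Int)
      · rw [if_pos hle]
        have hc : ¬ ((result.length : Int) + (m :: ms).length ≤ limit ∨ m :: ms = []) := by
          simp; omega
        rw [if_neg hc]
        have : (limit - (result.length : Int)).toNat = 0 := by omega
        simp [this]
      · rw [if_neg hle, ih]
        have hd : (limit - ((result ++ [m]).length : Int)).toNat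
            = (limit - (result.length : Int)).toNat - 1 := by simp; omega
        have hd1 : (limit - (result.length : Int)).toNat
            = ((limit - (result.length : Int)).toNat - 1) + 1 := by omega
        by_cases hms : ms = []
        · subst hms
          have hc1 : ((result ++ [m]).length : Int) + ([] : List String).length ≤ limit
              ∨ ([] : List String) = [] := Or.inr rfl
          have hc2 : (result.length : Int) + ([m] : List String).length ≤ limit
              ∨ ([m] : List String) = [] := by simp; omega
          rw [if_pos hc1, if_pos hc2]
          rw [hd1]
          simp
        · have hcond : (((result ++ [m]).length : Int) + ms.length ≤ limit ∨ ms = [])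
              ↔ ((result.length : Int) + ((m :: ms).length : Int) ≤ limit ∨ m :: ms = []) := by
            simp [hms]; omega
          have hval : (result ++ [m]) ++ ms.take (limit - ((result ++ [m]).length : Int)).toNat
              = result ++ (m :: ms).take (limit - (result.length : Int)).toNat := by
            rw [hd, hd1, List.take_succ_cons]
            simp
          rw [hval]
          by_cases hc : (result.length : Int) + ((m :: ms).length : Int) ≤ limit ∨ m :: ms = []
          · rw [if_pos hc, if_pos (hcond.mpr hc)]
          · rw [if_neg hc, if_neg (fun hh => hc (hcond.mp hh))]

lemma whileLoop_cyc_aux (melody : List String) (hne : melody ≠ []) :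
    ∀ (N : Nat) (limit : Int) (result : List String),
      (limit - (result.length : Int)).toNat ≤ N →
      whileLoop melody limit result
        = result ++ cyc melody (limit - (result.length : Int)).toNat := by
  intro N
  induction N with
  | zero =>
      intro limit result hN
      rw [whileLoop, dif_neg (by omega)]
      have h0 : (limit - (result.length : Int)).toNat = 0 := by omega
      rw [h0, cyc]
      simp
  | succ N ih =>
      intro limit result hN
      have hlen0 : melody.length ≠ 0 := by simpa [List.length_eq_zero_iff] using hne
      by_cases h : (result.length : Int) < limit
      · rw [whileLoop, dif_pos h]
        split
        next res heq =>
          -- early `return` out of the for loop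
          rw [innerFor_spec] at heq
          by_cases hc : (result.length : Int) + melody.length ≤ limit ∨ melody = []
          · rw [if_pos hc] at heq
            exact absurd heq (by simp)
          · rw [if_neg hc] at heq
            push_neg at hc
            injection heq with heq
            rw [← heq]
            conv_rhs => rw [cyc]
            rw [dif_neg (by push_neg; exact ⟨hne, by omega⟩), if_neg (by omega)]
        next res heq =>
          have hlen := innerFor_inr_length melody limit result res heq
          rw [dif_neg hne]
          rw [innerFor_spec] at heq
          by_cases hc : (result.length : Int) + melody.length ≤ limit ∨ melody = []
          · rw [if_pos hc] at heq
            injection heq with heq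
            have hcc : (result.length : Int) + melody.length ≤ limit := by
              rcases hc with hc | hc
              · exact hc
              · exact absurd hc hne
            have htake : melody.take (limit - (result.length : Int)).toNat = melody :=
              List.take_of_length_le (by omega)
            rw [htake] at heq
            rw [ih limit res (by omega), ← heq]
            conv_rhs => rw [cyc]
            rw [dif_neg (by push_neg; exact ⟨hne, by omega⟩), if_pos (by omega)]
            have harg : (limit - (((result ++ melody).length : Nat) : Int)).toNat
                = (limit - (result.length : Int)).toNat - melody.length := by
              simp
              omega
            rw [harg, List.append_assoc]
          · rw [if_neg hc] at heq
            exact absurd heq (by simp)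
      · rw [whileLoop, dif_neg h]
        have h0 : (limit - (result.length : Int)).toNat = 0 := by omega
        rw [h0, cyc]
        simp

lemma take_append_aux {α : Type} (l1 l2 : List α) (n : Nat) :
    (l1 ++ l2).take n = l1.take n ++ l2.take (n - l1.length) := by
  induction l1 generalizing n with
  | nil => simp
  | cons a l ih =>
      cases n with
      | zero => simp
      | succ m => simp [List.take_succ_cons, ih m, Nat.succ_sub_succ]

lemma take_flatten_replicate (melody : List String) (hne : melody ≠ []) :
    ∀ (k n : Nat), n ≤ k * melody.length →
      (List.replicate k melody).flatten.take n = cyc melody n := by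
  intro k
  have hlen0 : melody.length ≠ 0 := by simpa [List.length_eq_zero_iff] using hne
  induction k with
  | zero =>
      intro n hn
      have : n = 0 := by omega
      subst this
      rw [cyc]; simp
  | succ k ih =>
      intro n hn
      rw [List.replicate_succ, List.flatten_cons, take_append_aux]
      by_cases h0 : n = 0
      · subst h0; rw [cyc]; simp
      · by_cases hge : melody.length ≤ n
        · rw [List.take_of_length_le hge, ih (n - melody.length) (by
            have h1 : 0 < melody.length := Nat.pos_of_ne_zero hlen0
            have hsm : (k + 1) * melody.length = k * melody.length + melody.length :=
              Nat.succ_mul k melody.length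
            omega)]
          conv_rhs => rw [cyc]
          rw [dif_neg (by push_neg; exact ⟨hne, h0⟩), if_pos hge]
        · push_neg at hge
          have : n - melody.length = 0 := by omega
          rw [this]
          rw [cyc, dif_neg (by push_neg; exact ⟨hne, h0⟩), if_neg (by omega)]
          simp

-- ===== VERDICT (by name: the statement is the Claim_ definition above) =====
theorem concat_music_spec : Claim_equal_concat_music := by
  intro melody limit _hdom hpre
  unfold Spec_concat_music concat_music concat_music_alt
  by_cases hl : limit ≤ 0
  · rw [if_pos (Or.inl hl)]
    rw [whileLoop, dif_neg (by simp; omega)]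
    rfl
  · have hne : melody ≠ [] := by
      rcases hpre with h | h
      · exact h
      · exact absurd h hl
    rw [if_neg (by push_neg; exact ⟨by omega, hne⟩)]
    have hlen0 : melody.length ≠ 0 := by simpa [List.length_eq_zero_iff] using hne
    have hlpos : (0 : Int) < (melody.length : Int) := by exact_mod_cast Nat.pos_of_ne_zero hlen0
    rw [whileLoop_cyc_aux melody hne (limit - ((([] : List String).length : Nat) : Int)).toNat limit [] (le_refl _)]
    simp only [List.length_nil, Nat.cast_zero, Int.sub_zero, List.nil_append]
    -- B side
    have hfd : PySem.Int.floordiv limit (melody.length : Int) = limit / (melody.length : Int) :=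
      PySem.Int.floordiv_eq_ediv_of_pos hlpos
    rw [hfd]
    set q : Int := limit / (melody.length : Int) with hq
    have hq0 : 0 ≤ q := Int.ediv_nonneg (by omega) (by omega)
    have hlt : limit < (q + 1) * (melody.length : Int) :=
      Int.lt_ediv_add_one_mul_self limit hlpos
    unfold PySem.List.pyRepeat
    rw [PySem.List.slice_to _ (by omega)]
    have hq1 : (((q + 1).toNat : Nat) : Int) = q + 1 := Int.toNat_of_nonneg (by omega)
    have hcast : (((q + 1).toNat * melody.length : Nat) : Int)
        = (q + 1) * (melody.length : Int) := by push_cast [hq1]; ring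
    have hbound : limit.toNat ≤ (q + 1).toNat * melody.length := by omega
    rw [take_flatten_replicate melody hne _ _ hbound]
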